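-- pv_equiv track=rewrite | github.com/TMElyralab/MuseTalk | musetalk/data/sample_method.py | process_bbox_musetalk
-- ===== SOURCE A (Python) =====
-- def process_bbox_musetalk(face_array, landmark_array):
--     x_min_face, y_min_face, x_max_face, y_max_face = map(int, face_array)
--     x_min_lm = min([int(x) for x, y in landmark_array])
--     y_min_lm = min([int(y) for x, y in landmark_array])
--     x_max_lm = max([int(x) for x, y in landmark_array])
--     y_max_lm = max([int(y) for x, y in landmark_array])
--     x_min = min(x_min_face, x_min_lm)
--     y_min = min(y_min_face, y_min_lm)
--     x_max = max(x_max_face, x_max_lm)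
--     y_max = max(y_max_face, y_max_lm)
--
--     x_min = max(x_min, 0)
--     y_min = max(y_min, 0)
--
--     return [x_min, y_min, x_max, y_max]
-- ===== SOURCE B (Python) =====
-- def process_bbox_musetalk(face_array, landmark_array):
--     x_min_face, y_min_face, x_max_face, y_max_face = (int(v) for v in face_array)
--     x0, y0 = landmark_array[0]
--     x_min_lm = x_max_lm = int(x0)
--     y_min_lm = y_max_lm = int(y0)
--     for x, y in landmark_array[1:]:
--         x, y = int(x), int(y)
--         if x < x_min_lm: x_min_lm = x
--         if y < y_min_lm: y_min_lm = y
--         if x > x_max_lm: x_max_lm = x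
--         if y > y_max_lm: y_max_lm = y
--     return [max(min(x_min_face, x_min_lm), 0),
--             max(min(y_min_face, y_min_lm), 0),
--             max(x_max_face, x_max_lm),
--             max(y_max_face, y_max_lm)]
-- ===== Notes on version B (the rewrite author's own statement) =====
-- stated objective: alternative
-- what changed: Four separate min/max comprehension scans over landmark_array are replaced by one single pass maintaining four running extremum accumulators initialized from the first point.
import Mathlib
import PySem

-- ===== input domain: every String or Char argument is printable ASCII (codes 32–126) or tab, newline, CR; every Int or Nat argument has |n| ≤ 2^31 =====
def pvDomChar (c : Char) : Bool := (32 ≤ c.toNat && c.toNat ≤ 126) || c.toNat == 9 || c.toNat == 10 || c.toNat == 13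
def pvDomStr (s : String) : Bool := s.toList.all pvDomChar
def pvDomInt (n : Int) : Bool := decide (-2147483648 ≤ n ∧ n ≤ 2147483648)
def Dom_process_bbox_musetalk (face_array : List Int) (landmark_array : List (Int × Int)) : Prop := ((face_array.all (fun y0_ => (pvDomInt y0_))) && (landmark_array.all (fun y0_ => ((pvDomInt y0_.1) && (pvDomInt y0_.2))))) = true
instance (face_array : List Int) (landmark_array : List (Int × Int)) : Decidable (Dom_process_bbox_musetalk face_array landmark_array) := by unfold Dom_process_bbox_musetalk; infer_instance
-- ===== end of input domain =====

-- B replaces A's four separate min/max scans over landmark_array by a single pass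
-- maintaining four running extremum accumulators (objective: alternative decomposition).


-- ===== PORT A =====
-- four separate min/max over the mapped coordinate lists, as in A
def process_bbox_musetalk (face_array : List Int) (landmark_array : List (Int × Int)) : List Int :=
  match face_array,
        PySem.List.min? (landmark_array.map Prod.fst) (fun v => v),
        PySem.List.min? (landmark_array.map Prod.snd) (fun v => v),
        PySem.List.max? (landmark_array.map Prod.fst) (fun v => v),
        PySem.List.max? (landmark_array.map Prod.snd) (fun v => v) with
  | [xf, yf, xF, yF], some xmin, some ymin, some xmax, some ymax =>
      [max (min xf xmin) 0, max (min yf ymin) 0, max xF xmax, max yF ymax]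
  | _, _, _, _, _ => []   -- unreachable under Pre_ (A raises there)

-- ===== PORT B =====
-- single-pass accumulator loop of Source B
def pvBboxLoop : List (Int × Int) → Int → Int → Int → Int → Int × Int × Int × Int
  | [], a, b, c, d => (a, b, c, d)
  | (x, y) :: t, a, b, c, d =>
      pvBboxLoop t (if x < a then x else a) (if y < b then y else b)
                   (if x > c then x else c) (if y > d then y else d)

def process_bbox_musetalk_alt (face_array : List Int) (landmark_array : List (Int × Int)) : List Int :=
  match landmark_array with
  | (x0, y0) :: rest =>
      let e := pvBboxLoop rest x0 y0 x0 y0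
      if hf : face_array.length = 4 then
        -- unpacking the four face coordinates (Source B raises ValueError otherwise)
        [max (min (face_array[0]'(by omega)) e.1) 0,
         max (min (face_array[1]'(by omega)) e.2.1) 0,
         max (face_array[2]'(by omega)) e.2.2.1,
         max (face_array[3]'(by omega)) e.2.2.2]
      else []       -- unreachable under Pre_
  | [] => []        -- unreachable under Pre_ (Source B raises IndexError there)

-- ===== PRECONDITION & SPEC =====
-- Pre_ excludes exactly the inputs where A raises: face_array not of length 4
-- (unpacking ValueError) or empty landmark_array (min([]) ValueError).
def Pre_process_bbox_musetalk (face_array : List Int) (landmark_array : List (Int × Int)) : Prop :=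
  face_array.length = 4 ∧ landmark_array ≠ []
instance (face_array : List Int) (landmark_array : List (Int × Int)) : Decidable (Pre_process_bbox_musetalk face_array landmark_array) := by unfold Pre_process_bbox_musetalk; infer_instance
def pvWitness_process_bbox_musetalk : List Int × (List (Int × Int)) := ([1, 2, 3, 4], [(0, 5), (6, -1)])
def Spec_process_bbox_musetalk (face_array : List Int) (landmark_array : List (Int × Int)) (out : List Int) : Prop := out = process_bbox_musetalk_alt face_array landmark_array
instance (face_array : List Int) (landmark_array : List (Int × Int)) (out : List Int) : Decidable (Spec_process_bbox_musetalk face_array landmark_array out) := by unfold Spec_process_bbox_musetalk; infer_instance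

-- ===== CLAIM (what is proved, stated in full; the proofs are below) =====
def Claim_equal_process_bbox_musetalk : Prop := ∀ (face_array : List Int) (landmark_array : List (Int × Int)), Dom_process_bbox_musetalk face_array landmark_array → Pre_process_bbox_musetalk face_array landmark_array → Spec_process_bbox_musetalk face_array landmark_array (process_bbox_musetalk face_array landmark_array)

-- ===== LEMMAS AND PROOFS =====
theorem pvBboxLoop_eq (t : List (Int × Int)) : ∀ (a b c d : Int),
    pvBboxLoop t a b c d =
      ((t.map Prod.fst).foldl min a, (t.map Prod.snd).foldl min b,
       (t.map Prod.fst).foldl max c, (t.map Prod.snd).foldl max d) := by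
  induction t with
  | nil => intro a b c d; rfl
  | cons p t ih =>
      intro a b c d
      obtain ⟨x, y⟩ := p
      have h1 : (if x < a then x else a) = min a x := by rw [Int.min_def]; split <;> split <;> omega
      have h2 : (if y < b then y else b) = min b y := by rw [Int.min_def]; split <;> split <;> omega
      have h3 : (if x > c then x else c) = max c x := by rw [Int.max_def]; split <;> split <;> omega
      have h4 : (if y > d then y else d) = max d y := by rw [Int.max_def]; split <;> split <;> omega
      simp only [pvBboxLoop, h1, h2, h3, h4, ih, List.map_cons, List.foldl_cons]

theorem process_bbox_musetalk_spec : Claim_equal_process_bbox_musetalk := by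
  intro face_array landmark_array _ hpre
  obtain ⟨hlen, hne⟩ := hpre
  match face_array, hlen with
  | [xf, yf, xF, yF], _ =>
    match landmark_array, hne with
    | (x0, y0) :: rest, _ =>
      show Spec_process_bbox_musetalk _ _ _
      unfold Spec_process_bbox_musetalk process_bbox_musetalk process_bbox_musetalk_alt
      simp only [List.map_cons, PySem.List.min?_id_cons, PySem.List.max?_id_cons,
        pvBboxLoop_eq]
      norm_num

-- ===== VERDICT (by name: the statement is the Claim_ definition above) =====
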